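-- pv_equiv track=rewrite | github.com/daid/LADXR | musicData.py | songPseudoOpsSize
-- ===== SOURCE A (Python) =====
-- OP_NOTE_MAX = 0x90
--
-- def songPseudoOpsSize(ops):
--     current_len = -1
--     size = 0
--     for op in ops:
--         if op[0] < OP_NOTE_MAX:
--             if op[1] == current_len:
--                 size += 1
--             else:
--                 current_len = op[1]
--                 size += 2
--         else:
--             size += len(op)
--     return size
-- ===== SOURCE B (Python) =====
-- OP_NOTE_MAX = 0x90
--
-- def songPseudoOpsSize(ops):
--     # Run-length view: encoding cost = one byte per note plus one extra byte at the
--     # start of each maximal run of equal note lengths (a run of length -1 at the very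
--     # beginning needs no extra byte: -1 is the decoder's initial note length),
--     # plus len(op) for every non-note op.
--     notes = [op[1] for op in ops if op[0] < OP_NOTE_MAX]
--     size = sum(len(op) for op in ops if op[0] >= OP_NOTE_MAX) + len(notes)
--     i = 0
--     while i < len(notes):
--         j = i + 1
--         while j < len(notes) and notes[j] == notes[i]:
--             j += 1
--         size += 1
--         i = j
--     if notes and notes[0] == -1:
--         size -= 1
--     return size
-- ===== Notes on version B (the rewrite author's own statement) =====
-- stated objective: alternative
-- what changed: Replaces A's stateful prev-length loop with a run-length view: collect note lengths, count maximal runs with nested index while-loops, and take cost = non-note bytes + one byte per note + one extra byte per run (minus one if the first run already has the decoder's initial length -1).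
import Mathlib
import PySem

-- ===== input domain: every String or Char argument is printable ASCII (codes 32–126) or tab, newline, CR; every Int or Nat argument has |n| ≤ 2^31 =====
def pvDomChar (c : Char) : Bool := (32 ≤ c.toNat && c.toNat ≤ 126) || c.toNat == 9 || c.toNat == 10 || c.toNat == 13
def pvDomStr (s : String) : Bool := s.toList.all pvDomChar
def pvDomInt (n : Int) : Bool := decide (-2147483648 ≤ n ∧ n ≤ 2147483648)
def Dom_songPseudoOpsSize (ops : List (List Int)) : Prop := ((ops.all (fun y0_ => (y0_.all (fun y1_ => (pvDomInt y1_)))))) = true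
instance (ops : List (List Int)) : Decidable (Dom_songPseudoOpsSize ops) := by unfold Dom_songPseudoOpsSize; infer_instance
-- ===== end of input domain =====

-- B replaces A's stateful prev-length loop with a run-length-encoding count: one byte per
-- note plus one extra byte per maximal run of equal note lengths, plus non-note bytes
-- (objective: alternative).


-- ===== PORT A =====
-- A's for-loop with the (current_len, size) state; op[0]/op[1] via pyGet? (Pre_ keeps it in range).
def songPseudoOpsSize (ops : List (List Int)) : Int :=
  (ops.foldl (fun (st : Int × Int) op =>
      if (PySem.List.pyGet? op 0).getD 0 < 144 then
        if (PySem.List.pyGet? op 1).getD 0 = st.1 then (st.1, st.2 + 1)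
        else ((PySem.List.pyGet? op 1).getD 0, st.2 + 2)
      else (st.1, st.2 + (op.length : Int))) ((-1 : Int), (0 : Int))).2

-- ===== PORT B =====
-- [op[1] for op in ops if op[0] < OP_NOTE_MAX]
def pvNoteLens (ops : List (List Int)) : List Int :=
  ops.filterMap (fun op =>
    if (PySem.List.pyGet? op 0).getD 0 < 144 then some ((PySem.List.pyGet? op 1).getD 0) else none)

-- inner while: advance j while notes[j] == notes[i] (v = notes[i]); fuel only bounds the
-- loop (it is called with fuel = notes.length, always enough), exact otherwise
def pvRunEnd (notes : List Int) (v : Int) : Nat → Nat → Nat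
  | 0, j => j
  | fuel + 1, j =>
    if h : j < notes.length then
      if notes[j] = v then pvRunEnd notes v fuel (j + 1) else j
    else j

-- outer while: one iteration per maximal run, counting 1 each; same fuel convention
def pvRuns (notes : List Int) : Nat → Nat → Int
  | 0, _ => 0
  | fuel + 1, i =>
    if _h : i < notes.length then
      1 + pvRuns notes fuel (pvRunEnd notes notes[i] notes.length (i + 1))
    else 0

def songPseudoOpsSize_alt (ops : List (List Int)) : Int :=
  let notes := pvNoteLens ops
  let size := (ops.foldl
      (fun (s : Int) op => if (PySem.List.pyGet? op 0).getD 0 < 144 then s else s + (op.length : Int)) 0)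
      + (notes.length : Int) + pvRuns notes notes.length 0
  if notes.head? = some (-1) then size - 1 else size

-- ===== PRECONDITION & SPEC =====
-- Pre_ excludes exactly the inputs where Python A raises IndexError: an empty op (op[0]),
-- or a note op (op[0] < 0x90) of length 1 (op[1]).
def Pre_songPseudoOpsSize (ops : List (List Int)) : Prop :=
  ∀ op ∈ ops, op ≠ [] ∧ (op.headI < 144 → 2 ≤ op.length)
instance (ops : List (List Int)) : Decidable (Pre_songPseudoOpsSize ops) := by
  unfold Pre_songPseudoOpsSize; infer_instance
def pvWitness_songPseudoOpsSize : List (List Int) := [[144, 1, 2], [5, 3], [5, 3]]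

def Spec_songPseudoOpsSize (ops : List (List Int)) (out : Int) : Prop := out = songPseudoOpsSize_alt ops
instance (ops : List (List Int)) (out : Int) : Decidable (Spec_songPseudoOpsSize ops out) := by unfold Spec_songPseudoOpsSize; infer_instance

-- ===== CLAIM (what is proved, stated in full; the proofs are below) =====
def Claim_equal_songPseudoOpsSize : Prop := ∀ (ops : List (List Int)), Dom_songPseudoOpsSize ops → Pre_songPseudoOpsSize ops → Spec_songPseudoOpsSize ops (songPseudoOpsSize ops)

-- ===== LEMMAS AND PROOFS =====

-- cost of A's note handling starting from previous length `prev`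
def pvCost (prev : Int) : List Int → Int
  | [] => 0
  | x :: xs => (if x = prev then 1 else 2) + pvCost x xs

-- number of positions whose value differs from its predecessor (prev seeds the first)
def pvChanges (prev : Int) : List Int → Int
  | [] => 0
  | x :: xs => (if x = prev then 0 else 1) + pvChanges x xs

-- number of maximal runs
def pvRunCount : List Int → Int
  | [] => 0
  | x :: xs => 1 + pvChanges x xs

theorem pvCost_eq_len_add_changes (L : List Int) : ∀ prev : Int,
    pvCost prev L = (L.length : Int) + pvChanges prev L := by
  induction L with
  | nil => intro prev; simp [pvCost, pvChanges]
  | cons x xs ih =>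
    intro prev
    simp only [pvCost, pvChanges, ih x, List.length_cons]
    by_cases h : x = prev <;> simp [h]
    · ring
    · ring

theorem pvChanges_eq_runCount (prev : Int) (L : List Int) :
    pvChanges prev L = pvRunCount L - (if L.head? = some prev then 1 else 0) := by
  cases L with
  | nil => simp [pvChanges, pvRunCount]
  | cons x xs =>
    simp only [pvChanges, pvRunCount, List.head?_cons]
    by_cases h : x = prev
    · simp [h]
    · simp [h]

theorem pvRunEnd_ge (notes : List Int) (v : Int) : ∀ (fuel j : Nat), j ≤ pvRunEnd notes v fuel j := by
  intro fuel
  induction fuel with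
  | zero => intro j; simp [pvRunEnd]
  | succ f ih =>
    intro j
    simp only [pvRunEnd]
    split
    · split
      · exact le_trans (Nat.le_succ j) (ih (j + 1))
      · exact le_refl j
    · exact le_refl j

theorem pvRunEnd_stop (notes : List Int) (v : Int) (fuel j : Nat) (h : notes.length ≤ j) :
    pvRunEnd notes v fuel j = j := by
  cases fuel with
  | zero => simp [pvRunEnd]
  | succ f => simp [pvRunEnd, Nat.not_lt.mpr h]

theorem pvRunEnd_fuel (notes : List Int) (v : Int) : ∀ (f1 f2 j : Nat),
    notes.length - j ≤ f1 → notes.length - j ≤ f2 →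
    pvRunEnd notes v f1 j = pvRunEnd notes v f2 j := by
  intro f1
  induction f1 with
  | zero =>
    intro f2 j h1 _
    rw [pvRunEnd_stop notes v 0 j (by omega), pvRunEnd_stop notes v f2 j (by omega)]
  | succ f ih =>
    intro f2 j h1 h2
    by_cases hj : j < notes.length
    · cases f2 with
      | zero => omega
      | succ f2' =>
        simp only [pvRunEnd, dif_pos hj]
        split
        · exact ih f2' (j + 1) (by omega) (by omega)
        · rfl
    · rw [pvRunEnd_stop notes v (f + 1) j (by omega), pvRunEnd_stop notes v f2 j (by omega)]

theorem pvRunEnd_len_unfold (notes : List Int) (v : Int) (j : Nat) (hj : j < notes.length) :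
    pvRunEnd notes v notes.length j =
      if notes[j]'hj = v then pvRunEnd notes v notes.length (j + 1) else j := by
  obtain ⟨m, hm⟩ : ∃ m, notes.length = m + 1 := ⟨notes.length - 1, by omega⟩
  conv_lhs => rw [hm]
  simp only [pvRunEnd, dif_pos hj]
  split
  · exact pvRunEnd_fuel notes v m notes.length (j + 1) (by omega) (by omega)
  · rfl

theorem pvRuns_fuel (notes : List Int) : ∀ (f1 f2 i : Nat),
    notes.length - i ≤ f1 → notes.length - i ≤ f2 →
    pvRuns notes f1 i = pvRuns notes f2 i := by
  intro f1
  induction f1 with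
  | zero =>
    intro f2 i h1 _
    have hi : ¬ i < notes.length := by omega
    cases f2 with
    | zero => rfl
    | succ f2' => simp [pvRuns, hi]
  | succ f ih =>
    intro f2 i h1 h2
    by_cases hi : i < notes.length
    · cases f2 with
      | zero => omega
      | succ f2' =>
        simp only [pvRuns, dif_pos hi]
        have hge := pvRunEnd_ge notes (notes[i]'hi) notes.length (i + 1)
        rw [ih f2' (pvRunEnd notes (notes[i]'hi) notes.length (i + 1)) (by omega) (by omega)]
    · cases f2 with
      | zero => simp [pvRuns, hi]
      | succ f2' => simp [pvRuns, hi]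

theorem pvChanges_drop (notes : List Int) : ∀ (fuel j : Nat) (v : Int),
    notes.length - j ≤ fuel →
    pvChanges v (notes.drop j) = pvRuns notes fuel (pvRunEnd notes v notes.length j) := by
  intro fuel
  induction fuel with
  | zero =>
    intro j v h
    have hj : notes.length ≤ j := by omega
    rw [pvRunEnd_stop notes v notes.length j hj, List.drop_eq_nil_of_le hj]
    rfl
  | succ f ih =>
    intro j v h
    by_cases hj : j < notes.length
    · rw [List.drop_eq_getElem_cons hj]
      by_cases he : notes[j]'hj = v
      · rw [pvRunEnd_len_unfold notes v j hj, if_pos he]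
        have hL : pvChanges v ((notes[j]'hj) :: notes.drop (j + 1))
            = pvChanges v (notes.drop (j + 1)) := by
          simp [pvChanges, he]
        rw [hL, ih (j + 1) v (by omega)]
        have hge := pvRunEnd_ge notes v notes.length (j + 1)
        exact pvRuns_fuel notes f (f + 1) (pvRunEnd notes v notes.length (j + 1))
          (by omega) (by omega)
      · rw [pvRunEnd_len_unfold notes v j hj, if_neg he]
        simp only [pvRuns, dif_pos hj, pvChanges, if_neg he]
        rw [ih (j + 1) (notes[j]'hj) (by omega)]
    · rw [pvRunEnd_stop notes v notes.length j (by omega),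
        List.drop_eq_nil_of_le (by omega)]
      simp [pvRuns, hj, pvChanges]

theorem pvRuns_eq_runCount (notes : List Int) : pvRuns notes notes.length 0 = pvRunCount notes := by
  cases notes with
  | nil => rfl
  | cons x xs =>
    have h0 : 0 < (x :: xs).length := by simp
    obtain ⟨m, hm⟩ : ∃ m, (x :: xs).length = m + 1 := ⟨xs.length, by simp⟩
    conv_lhs => rw [hm]
    simp only [pvRuns, dif_pos h0]
    have hdrop : pvChanges x ((x :: xs).drop 1)
        = pvRuns (x :: xs) m (pvRunEnd (x :: xs) x (x :: xs).length 1) := by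
      exact pvChanges_drop (x :: xs) m 1 x (by simp at hm ⊢; omega)
    simp only [List.drop_one, List.tail_cons] at hdrop
    simp only [List.getElem_cons_zero, pvRunCount, ← hdrop]

theorem pvOther_fold (ops : List (List Int)) : ∀ (s : Int),
    (ops.foldl (fun (s : Int) op => if (PySem.List.pyGet? op 0).getD 0 < 144 then s else s + (op.length : Int)) s)
      = s + (ops.foldl (fun (s : Int) op => if (PySem.List.pyGet? op 0).getD 0 < 144 then s else s + (op.length : Int)) 0) := by
  induction ops with
  | nil => intro s; simp
  | cons op tl ih =>
    intro s
    simp only [List.foldl_cons]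
    by_cases h : (PySem.List.pyGet? op 0).getD 0 < 144
    · simp only [if_pos h]; exact ih s
    · simp only [if_neg h]; rw [ih (s + (op.length : Int)), ih ((0 : Int) + (op.length : Int))]; ring

theorem pvA_fold (ops : List (List Int)) : ∀ (prev s : Int),
    (ops.foldl (fun (st : Int × Int) op =>
      if (PySem.List.pyGet? op 0).getD 0 < 144 then
        if (PySem.List.pyGet? op 1).getD 0 = st.1 then (st.1, st.2 + 1)
        else ((PySem.List.pyGet? op 1).getD 0, st.2 + 2)
      else (st.1, st.2 + (op.length : Int))) (prev, s)).2
      = s + pvCost prev (pvNoteLens ops)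
          + (ops.foldl (fun (s : Int) op => if (PySem.List.pyGet? op 0).getD 0 < 144 then s else s + (op.length : Int)) 0) := by
  induction ops with
  | nil => intro prev s; simp [pvNoteLens, pvCost]
  | cons op tl ih =>
    intro prev s
    by_cases h0 : (PySem.List.pyGet? op 0).getD 0 < 144
    · by_cases h1 : (PySem.List.pyGet? op 1).getD 0 = prev
      · simp only [List.foldl_cons, h0, if_pos, h1, ih prev (s + 1),
          pvNoteLens, List.filterMap_cons]
        simp [pvCost]
        ring
      · simp only [List.foldl_cons, if_pos h0, if_neg h1,
          ih ((PySem.List.pyGet? op 1).getD 0) (s + 2)]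
        simp [h0, h1, pvCost, pvNoteLens]
        ring
    · simp only [List.foldl_cons, if_neg h0, ih prev (s + op.length)]
      simp [h0, pvNoteLens, pvOther_fold tl (op.length : Int)]
      ring

-- ===== VERDICT (by name: the statement is the Claim_ definition above) =====
theorem songPseudoOpsSize_spec : Claim_equal_songPseudoOpsSize := by
  intro ops _ _
  unfold Spec_songPseudoOpsSize songPseudoOpsSize songPseudoOpsSize_alt
  simp only [pvA_fold, pvRuns_eq_runCount, pvCost_eq_len_add_changes,
    pvChanges_eq_runCount (-1)]
  by_cases h : (pvNoteLens ops).head? = some (-1) <;> simp [h] <;> ring
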